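-- pv_equiv track=rewrite | github.com/qqpann/AtCoder | abc129/c.py | calcResult
-- ===== SOURCE A (Python) =====
-- from math import factorial as f
--
-- def nCr(n,r):
--     return f(n) // f(r) // f(n-r)
--
-- def calcResult(n):
--     if n == 1:
--         return 1
--     if n == 0:
--         return 0
--     n = n - 1
--     possible2 = n // 2
--     res = 0
--     for r in range(possible2 + 1):
--         _n = max(n-2*r+r, r)
--         _r = min(n-2*r+r, r)
--         res += nCr(_n, _r)
--     return res
-- ===== SOURCE B (Python) =====
-- def calcResult(n):
--     a, b = 0, 1
--     for _ in range(n):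
--         a, b = b, a + b
--     return a
-- ===== Notes on version B (the rewrite author's own statement) =====
-- stated objective: faster
-- what changed: Replaces the loop that sums binomial coefficients C(n-1-r, r) computed via three big factorials each with the iterative two-variable Fibonacci recurrence (the diagonal binomial sum equals Fib(n)).
import Mathlib
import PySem

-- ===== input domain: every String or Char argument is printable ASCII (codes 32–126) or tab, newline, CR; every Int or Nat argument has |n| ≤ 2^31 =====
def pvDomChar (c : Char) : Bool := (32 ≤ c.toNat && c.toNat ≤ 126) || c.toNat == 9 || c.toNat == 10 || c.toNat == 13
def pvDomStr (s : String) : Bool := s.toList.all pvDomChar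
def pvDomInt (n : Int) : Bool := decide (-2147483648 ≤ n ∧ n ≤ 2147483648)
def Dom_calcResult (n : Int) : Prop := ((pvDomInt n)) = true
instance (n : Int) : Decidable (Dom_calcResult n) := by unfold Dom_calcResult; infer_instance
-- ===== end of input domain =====

-- B replaces the O(n^2)-bigint-ops sum of binomial coefficients by the linear Fibonacci
-- recurrence (the sum of diagonal binomials IS a Fibonacci number); objective: faster.

-- ===== PORT A =====
-- math.factorial raises on negative input; A only ever calls it with nonnegative
-- arguments, where (·.toNat.factorial) is exact.
def pyFactorial (k : Int) : Int := (Nat.factorial k.toNat : Int)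

def nCr (n r : Int) : Int :=
  PySem.Int.floordiv (PySem.Int.floordiv (pyFactorial n) (pyFactorial r)) (pyFactorial (n - r))

def calcResult (n : Int) : Int :=
  if n = 1 then 1
  else if n = 0 then 0
  else
    let m := n - 1
    let possible2 := PySem.Int.floordiv m 2
    (PySem.List.pyRange 0 (possible2 + 1) 1).foldl
      (fun res r => res + nCr (max (m - 2*r + r) r) (min (m - 2*r + r) r)) 0

-- ===== PORT B =====
def calcResult_alt (n : Int) : Int :=
  ((PySem.List.pyRange 0 n 1).foldl (fun (p : Int × Int) _ => (p.2, p.1 + p.2)) (0, 1)).1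

-- ===== PRECONDITION & SPEC =====
def Spec_calcResult (n : Int) (out : Int) : Prop := out = calcResult_alt n
instance (n : Int) (out : Int) : Decidable (Spec_calcResult n out) := by unfold Spec_calcResult; infer_instance

-- ===== CLAIM (what is proved, stated in full; the proofs are below) =====
def Claim_equal_calcResult : Prop := ∀ (n : Int), Dom_calcResult n → Spec_calcResult n (calcResult n)

-- ===== LEMMAS AND PROOFS =====

-- B's loop computes consecutive Fibonacci numbers.
theorem fib_fold (k : Nat) :
    (List.range k).foldl (fun (p : Int × Int) _ => (p.2, p.1 + p.2)) (0, 1)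
      = ((Nat.fib k : Int), (Nat.fib (k+1) : Int)) := by
  induction k with
  | zero => simp
  | succ k ih =>
      rw [List.range_succ, List.foldl_append, ih]
      simp [Nat.fib_add_two]

theorem calcResult_alt_eq (n : Int) (hn : 0 ≤ n) : calcResult_alt n = (Nat.fib n.toNat : Int) := by
  obtain ⟨k, rfl⟩ : ∃ k : Nat, n = (k : Int) := ⟨n.toNat, by omega⟩
  unfold calcResult_alt
  rw [PySem.List.pyRange_zero_natCast, List.foldl_map, fib_fold]
  simp

theorem calcResult_alt_neg (n : Int) (hn : n < 0) : calcResult_alt n = 0 := by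
  unfold calcResult_alt
  rw [PySem.List.pyRange_one_eq_nil (by omega)]
  rfl

theorem list_sum_range (f : Nat → Int) (n : Nat) :
    ((List.range n).map f).sum = ∑ i ∈ Finset.range n, f i := by
  induction n with
  | zero => simp
  | succ n ih => rw [List.range_succ, Finset.sum_range_succ, ← ih]; simp

-- each of A's summands is a binomial coefficient
theorem nCr_eq (M k : Nat) (hk : k ≤ M - k) :
    nCr ((M : Int) - k) (k : Int) = ((M - k).choose k : Int) := by
  have h1 : (M : Int) - k = ((M - k : Nat) : Int) := by omega
  have h2 : ((M - k : Nat) : Int) - (k : Int) = ((M - k - k : Nat) : Int) := by omega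
  rw [h1]
  unfold nCr pyFactorial
  rw [h2]
  simp only [Int.toNat_natCast]
  rw [PySem.Int.floordiv_natCast, PySem.Int.floordiv_natCast,
    Nat.div_div_eq_div_mul,
    Nat.choose_eq_factorial_div_factorial hk]

-- the diagonal binomial sum is a Fibonacci number
theorem sum_choose_fib (M : Nat) :
    ∑ k ∈ Finset.range (M/2 + 1), ((M - k).choose k) = Nat.fib (M + 1) := by
  have hext : ∑ k ∈ Finset.range (M/2 + 1), ((M - k).choose k)
      = ∑ k ∈ Finset.range (M + 1), ((M - k).choose k) := by
    have hsub : Finset.range (M/2 + 1) ⊆ Finset.range (M + 1) :=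
      by intro y hy; simp only [Finset.mem_range] at hy ⊢; omega
    refine Finset.sum_subset hsub ?_
    intro x hx hnx
    simp only [Finset.mem_range, not_lt] at hx hnx
    exact Nat.choose_eq_zero_of_lt (by omega)
  rw [hext, Nat.fib_succ_eq_sum_choose,
    Finset.Nat.sum_antidiagonal_eq_sum_range_succ_mk]
  rw [← Finset.sum_range_reflect (fun k => Nat.choose k (M - k)) (M + 1)]
  apply Finset.sum_congr rfl
  intro x hx
  simp only [Finset.mem_range] at hx
  congr 1; omega

theorem calcResult_eq (n : Int) (h2 : 2 ≤ n) : calcResult n = (Nat.fib n.toNat : Int) := by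
  unfold calcResult
  rw [if_neg (by omega), if_neg (by omega)]
  set M : Nat := (n - 1).toNat with hM
  have hm : n - 1 = (M : Int) := by omega
  simp only [hm]
  have hfd : PySem.Int.floordiv (M : Int) 2 + 1 = ((M / 2 + 1 : Nat) : Int) := by
    rw [show ((2:Int)) = ((2:Nat):Int) from rfl, PySem.Int.floordiv_natCast]
    push_cast; ring
  rw [hfd, PySem.List.pyRange_zero_natCast, List.foldl_map,
    PySem.List.foldl_add (List.range (M/2+1))
      (fun (k : Nat) => nCr (max ((M:Int) - 2*k + k) k) (min ((M:Int) - 2*k + k) k)) 0]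
  have hcong : (List.range (M/2+1)).map
      (fun (k : Nat) => nCr (max ((M:Int) - 2*k + k) k) (min ((M:Int) - 2*k + k) k))
      = (List.range (M/2+1)).map (fun (k : Nat) => (((M - k).choose k : Nat) : Int)) := by
    apply List.map_congr_left
    intro k hk
    simp only [List.mem_range] at hk
    have hkM : 2 * k ≤ M := by omega
    have hmax : max ((M:Int) - 2*k + k) k = (M : Int) - k := by
      rw [max_eq_left (by omega)]; ring
    have hmin : min ((M:Int) - 2*k + k) k = (k : Int) := by
      rw [show (M:Int) - 2*k + k = (M:Int) - k by ring, min_eq_right (by omega)]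
    rw [hmax, hmin, nCr_eq M k (by omega)]
  rw [hcong, list_sum_range, ← Nat.cast_sum, sum_choose_fib]
  have hMn : M + 1 = n.toNat := by omega
  rw [hMn, zero_add]

-- ===== VERDICT (by name: the statement is the Claim_ definition above) =====
theorem calcResult_spec : Claim_equal_calcResult := by
  intro n _
  unfold Spec_calcResult
  rcases lt_trichotomy n 0 with h | h | h
  · rw [calcResult_alt_neg n h]
    unfold calcResult
    rw [if_neg (by omega), if_neg (by omega)]
    have : PySem.Int.floordiv (n - 1) 2 + 1 ≤ 0 := by
      have := PySem.Int.floordiv_mul_add_mod (n-1) 2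
      have := PySem.Int.mod_two_eq (n-1)
      omega
    simp only [PySem.List.pyRange_one_eq_nil this, List.foldl_nil]
  · subst h; decide
  · rw [calcResult_alt_eq n (by omega)]
    by_cases h1 : n = 1
    · subst h1; decide
    · exact calcResult_eq n (by omega)
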